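-- pv_equiv track=rewrite | github.com/chending459166184-bit/agno | app/runtime.py | _ordered_required_agents
-- ===== SOURCE A (Python) =====
-- def _ordered_required_agents(required_agents: list[str]) -> list[str]:
--     order = [
--         "Knowledge Agent",
--         "Workspace Agent",
--         "Execution Agent",
--         "External Agent Broker",
--         "Test Agent",
--     ]
--     ordered = [agent_name for agent_name in order if agent_name in required_agents]
--     for agent_name in required_agents:
--         if agent_name not in ordered:
--             ordered.append(agent_name)
--     return ordered
-- ===== SOURCE B (Python) =====
-- def _ordered_required_agents(required_agents: list[str]) -> list[str]:
--     order = [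
--         "Knowledge Agent",
--         "Workspace Agent",
--         "Execution Agent",
--         "External Agent Broker",
--         "Test Agent",
--     ]
--     rank = {name: i for i, name in enumerate(order)}
--     deduped = list(dict.fromkeys(required_agents))
--     buckets = [[] for _ in range(len(order) + 1)]
--     for name in deduped:
--         buckets[rank.get(name, len(order))].append(name)
--     return [name for bucket in buckets for name in bucket]
-- ===== Notes on version B (the rewrite author's own statement) =====
-- stated objective: faster
-- what changed: Replaces A's order-scan plus per-element membership scan of the growing output by a rank table, dict.fromkeys deduplication and a single bucket-placement pass (counting sort by priority index).
import Mathlib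
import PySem

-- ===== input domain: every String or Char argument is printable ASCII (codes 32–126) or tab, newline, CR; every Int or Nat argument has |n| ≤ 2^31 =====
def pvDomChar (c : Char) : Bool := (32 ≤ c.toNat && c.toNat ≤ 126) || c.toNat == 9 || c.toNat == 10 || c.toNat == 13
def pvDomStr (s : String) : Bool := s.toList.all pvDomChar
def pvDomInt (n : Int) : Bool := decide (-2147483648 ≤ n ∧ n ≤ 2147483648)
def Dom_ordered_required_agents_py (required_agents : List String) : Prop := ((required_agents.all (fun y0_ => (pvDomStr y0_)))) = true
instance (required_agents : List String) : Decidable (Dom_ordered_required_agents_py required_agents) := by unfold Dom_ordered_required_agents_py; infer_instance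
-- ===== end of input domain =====

-- B replaces A's two membership-scanning passes by a rank table and a one-pass bucket placement
-- over the deduplicated input (a counting-sort by priority index): alternative algorithm, same values.

-- ===== PORT A =====
def ordered_required_agents_py (required_agents : List String) : List String :=
  let order : List String :=
    ["Knowledge Agent", "Workspace Agent", "Execution Agent", "External Agent Broker", "Test Agent"]
  let ordered := order.foldl
    (fun acc agent_name => if required_agents.contains agent_name then acc ++ [agent_name] else acc) []
  required_agents.foldl
    (fun ordered agent_name => if ordered.contains agent_name then ordered else ordered ++ [agent_name]) ordered

-- ===== PORT B =====
def ordered_required_agents_py_alt (required_agents : List String) : List String :=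
  let order : List String :=
    ["Knowledge Agent", "Workspace Agent", "Execution Agent", "External Agent Broker", "Test Agent"]
  let rank : PySem.Dict String Int :=
    (PySem.List.enumerate order).foldl (fun d p => PySem.Dict.insert d p.2 p.1) PySem.Dict.empty
  let deduped := PySem.List.dedup required_agents
  let buckets : List (List String) := List.replicate (order.length + 1) []
  let buckets := deduped.foldl
    (fun buckets name =>
      let r := (PySem.Dict.getD rank name (order.length : Int)).toNat
      buckets.set r ((buckets.getD r []) ++ [name])) buckets
  buckets.foldl (fun acc bucket => acc ++ bucket) []

-- ===== PRECONDITION & SPEC =====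
def Spec_ordered_required_agents_py (required_agents : List String) (out : List String) : Prop := out = ordered_required_agents_py_alt required_agents
instance (required_agents : List String) (out : List String) : Decidable (Spec_ordered_required_agents_py required_agents out) := by unfold Spec_ordered_required_agents_py; infer_instance

-- ===== CLAIM (what is proved, stated in full; the proofs are below) =====
def Claim_equal_ordered_required_agents_py : Prop := ∀ (required_agents : List String), Dom_ordered_required_agents_py required_agents → Spec_ordered_required_agents_py required_agents (ordered_required_agents_py required_agents)

-- ===== LEMMAS AND PROOFS =====

-- the fixed priority list
def pvOrd : List String :=
  ["Knowledge Agent", "Workspace Agent", "Execution Agent", "External Agent Broker", "Test Agent"]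

-- the rank table B builds
def pvRank : PySem.Dict String Int :=
  (PySem.List.enumerate pvOrd).foldl (fun d p => PySem.Dict.insert d p.2 p.1) PySem.Dict.empty

-- bucket index of a name under B's rank table
def pvKey (name : String) : Nat := (PySem.Dict.getD pvRank name (5 : Int)).toNat

-- B's bucket-placement step
def pvStep (buckets : List (List String)) (name : String) : List (List String) :=
  buckets.set (pvKey name) ((buckets.getD (pvKey name) []) ++ [name])

lemma pvKey_spec (n : String) :
    pvKey n = if n = "Knowledge Agent" then 0 else if n = "Workspace Agent" then 1
      else if n = "Execution Agent" then 2 else if n = "External Agent Broker" then 3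
      else if n = "Test Agent" then 4 else 5 := by
  unfold pvKey pvRank pvOrd
  by_cases h0 : n = "Knowledge Agent" <;> by_cases h1 : n = "Workspace Agent" <;>
    by_cases h2 : n = "Execution Agent" <;> by_cases h3 : n = "External Agent Broker" <;>
    by_cases h4 : n = "Test Agent" <;>
    simp [PySem.List.enumerate, h0, h1, h2, h3, h4,
      PySem.Dict.getD_insert, PySem.Dict.getD_empty]

-- A's second loop is Set.update; appending behind a prefix s only skips s's members
lemma pv_update_append (xs : List String) : ∀ (s t : List String),
    PySem.Set.update (s ++ t) xs = s ++ PySem.Set.update t (xs.filter (fun x => !s.contains x)) := by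
  induction xs with
  | nil => intro s t; simp [PySem.Set.update]
  | cons x xs ih =>
    intro s t
    show PySem.Set.update (PySem.Set.add (s ++ t) x) xs = _
    by_cases hs : x ∈ s
    · have hadd : PySem.Set.add (s ++ t) x = s ++ t := by
        simp [PySem.Set.add, List.mem_append, hs]
      rw [hadd, ih s t]
      simp [List.filter_cons, hs]
    · by_cases ht : x ∈ t
      · have hadd : PySem.Set.add (s ++ t) x = s ++ t := by
          simp [PySem.Set.add, List.mem_append, ht]
        rw [hadd, ih s t]
        have : PySem.Set.update t (List.filter (fun y => !s.contains y) (x :: xs)) =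
            PySem.Set.update (PySem.Set.add t x) (List.filter (fun y => !s.contains y) xs) := by
          simp [List.filter_cons, hs, PySem.Set.update]
        rw [this]
        have : PySem.Set.add t x = t := by simp [PySem.Set.add, ht]
        rw [this]
      · have hadd : PySem.Set.add (s ++ t) x = s ++ (t ++ [x]) := by
          simp [PySem.Set.add, List.mem_append, hs, ht]
        rw [hadd, ih s (t ++ [x])]
        have : PySem.Set.update t (List.filter (fun y => !s.contains y) (x :: xs)) =
            PySem.Set.update (PySem.Set.add t x) (List.filter (fun y => !s.contains y) xs) := by
          simp [List.filter_cons, hs, PySem.Set.update]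
        rw [this]
        have : PySem.Set.add t x = t ++ [x] := by simp [PySem.Set.add, ht]
        rw [this]

-- Set.update commutes with filter
lemma pv_update_filter (q : String → Bool) (xs : List String) : ∀ (t : List String),
    (PySem.Set.update t xs).filter q = PySem.Set.update (t.filter q) (xs.filter q) := by
  induction xs with
  | nil => intro t; simp [PySem.Set.update]
  | cons x xs ih =>
    intro t
    show ((PySem.Set.update (PySem.Set.add t x) xs).filter q) = _
    by_cases hq : q x
    · have hadd : (PySem.Set.add t x).filter q = PySem.Set.add (t.filter q) x := by
        by_cases ht : x ∈ t
        · have hm : x ∈ t.filter q := List.mem_filter.2 ⟨ht, hq⟩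
          simp [PySem.Set.add, ht, hm]
        · have hm : x ∉ t.filter q := fun hc => ht (List.mem_filter.1 hc).1
          simp [PySem.Set.add, ht, hm, List.filter_append, List.filter_cons, hq]
      rw [ih (PySem.Set.add t x), hadd]
      simp [List.filter_cons, hq, PySem.Set.update]
    · have hadd : (PySem.Set.add t x).filter q = t.filter q := by
        by_cases ht : x ∈ t <;>
          simp [PySem.Set.add, ht, List.filter_append, List.filter_cons, hq]
      rw [ih (PySem.Set.add t x), hadd]
      simp [List.filter_cons, hq]

lemma pv_update_nil_eq_dedup (l : List String) :
    PySem.Set.update [] l = PySem.List.dedup l := by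
  rw [PySem.List.dedup_eq_ofList, PySem.Set.ofList_eq_foldl]; rfl

lemma pv_dedup_filter (q : String → Bool) (xs : List String) :
    PySem.List.dedup (xs.filter q) = (PySem.List.dedup xs).filter q := by
  rw [← pv_update_nil_eq_dedup, ← pv_update_nil_eq_dedup]
  simpa using (pv_update_filter q xs []).symm

-- characterization of A
lemma pvA_spec (req : List String) :
    ordered_required_agents_py req =
      pvOrd.filter (fun a => req.contains a) ++
        (PySem.List.dedup req).filter (fun n => !pvOrd.contains n) := by
  show PySem.Set.update
      (List.foldl (fun acc a => if req.contains a then acc ++ [a] else acc) [] pvOrd) req = _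
  rw [PySem.List.foldl_append_if_eq_filter (fun a => req.contains a) pvOrd []]
  simp only [List.nil_append]
  have h := pv_update_append req (pvOrd.filter (fun a => req.contains a)) []
  simp only [List.append_nil] at h
  rw [h, pv_update_nil_eq_dedup]
  have hcongr : List.filter (fun x => !(pvOrd.filter (fun a => req.contains a)).contains x) req =
      List.filter (fun x => !pvOrd.contains x) req := by
    apply List.filter_congr
    intro x hx
    simp [List.mem_filter, hx]
  rw [hcongr, pv_dedup_filter]

-- bucket placement computes the six filters
lemma pv_buckets_spec (l : List String) : ∀ (b0 b1 b2 b3 b4 b5 : List String),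
    l.foldl pvStep [b0, b1, b2, b3, b4, b5] =
      [b0 ++ l.filter (fun n => pvKey n == 0), b1 ++ l.filter (fun n => pvKey n == 1),
       b2 ++ l.filter (fun n => pvKey n == 2), b3 ++ l.filter (fun n => pvKey n == 3),
       b4 ++ l.filter (fun n => pvKey n == 4), b5 ++ l.filter (fun n => pvKey n == 5)] := by
  induction l with
  | nil => intro b0 b1 b2 b3 b4 b5; simp
  | cons x l ih =>
    intro b0 b1 b2 b3 b4 b5
    simp only [List.foldl_cons]
    by_cases h0 : x = "Knowledge Agent"
    · subst h0
      rw [show pvStep [b0, b1, b2, b3, b4, b5] "Knowledge Agent" =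
            [b0 ++ ["Knowledge Agent"], b1, b2, b3, b4, b5] from rfl, ih]
      simp [List.filter_cons, pvKey_spec, List.append_assoc]
    ·
      by_cases h1 : x = "Workspace Agent"
      · subst h1
        rw [show pvStep [b0, b1, b2, b3, b4, b5] "Workspace Agent" =
              [b0, b1 ++ ["Workspace Agent"], b2, b3, b4, b5] from rfl, ih]
        simp [List.filter_cons, pvKey_spec, List.append_assoc]
      ·
        by_cases h2 : x = "Execution Agent"
        · subst h2
          rw [show pvStep [b0, b1, b2, b3, b4, b5] "Execution Agent" =
                [b0, b1, b2 ++ ["Execution Agent"], b3, b4, b5] from rfl, ih]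
          simp [List.filter_cons, pvKey_spec, List.append_assoc]
        ·
          by_cases h3 : x = "External Agent Broker"
          · subst h3
            rw [show pvStep [b0, b1, b2, b3, b4, b5] "External Agent Broker" =
                  [b0, b1, b2, b3 ++ ["External Agent Broker"], b4, b5] from rfl, ih]
            simp [List.filter_cons, pvKey_spec, List.append_assoc]
          ·
            by_cases h4 : x = "Test Agent"
            · subst h4
              rw [show pvStep [b0, b1, b2, b3, b4, b5] "Test Agent" =
                    [b0, b1, b2, b3, b4 ++ ["Test Agent"], b5] from rfl, ih]
              simp [List.filter_cons, pvKey_spec, List.append_assoc]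
            ·
              have hk : pvKey x = 5 := by rw [pvKey_spec]; simp [h0, h1, h2, h3, h4]
              simp only [pvStep, hk, List.set, List.getD, List.getElem?_cons_zero,
                List.getElem?_cons_succ, Option.getD_some]
              rw [ih]
              simp [List.filter_cons, pvKey_spec, h0, h1, h2, h3, h4, List.append_assoc]

-- characterization of B
lemma pvB_spec (req : List String) :
    ordered_required_agents_py_alt req =
      (PySem.List.dedup req).filter (fun n => pvKey n == 0) ++
      ((PySem.List.dedup req).filter (fun n => pvKey n == 1) ++
      ((PySem.List.dedup req).filter (fun n => pvKey n == 2) ++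
      ((PySem.List.dedup req).filter (fun n => pvKey n == 3) ++
      ((PySem.List.dedup req).filter (fun n => pvKey n == 4) ++
      (PySem.List.dedup req).filter (fun n => pvKey n == 5))))) := by
  show (((PySem.List.dedup req).foldl pvStep [[], [], [], [], [], []]).foldl
      (fun acc bucket => acc ++ bucket) []) = _
  rw [pv_buckets_spec]
  simp [List.append_assoc]

-- the deduplicated input filtered for one priority name
lemma pv_filter_single (req : List String) (c : String) :
    (PySem.List.dedup req).filter (fun n => n == c) =
      if req.contains c then [c] else [] := by
  by_cases h : c ∈ req
  · rw [List.filter_beq, List.count_eq_one_of_mem (PySem.List.nodup_dedup req)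
      ((PySem.List.mem_dedup req c).2 h)]
    simp [h]
  · rw [List.filter_beq, List.count_eq_zero_of_not_mem (by simp [PySem.List.mem_dedup, h])]
    simp [h]

-- the six bucket predicates, pointwise
lemma pv_keyfun0 : (fun n => pvKey n == 0) = (fun n => n == "Knowledge Agent") := by
  funext n; rw [pvKey_spec]; split_ifs with a b c d e <;> simp_all
lemma pv_keyfun1 : (fun n => pvKey n == 1) = (fun n => n == "Workspace Agent") := by
  funext n; rw [pvKey_spec]; split_ifs with a b c d e <;> simp_all
lemma pv_keyfun2 : (fun n => pvKey n == 2) = (fun n => n == "Execution Agent") := by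
  funext n; rw [pvKey_spec]; split_ifs with a b c d e <;> simp_all
lemma pv_keyfun3 : (fun n => pvKey n == 3) = (fun n => n == "External Agent Broker") := by
  funext n; rw [pvKey_spec]; split_ifs with a b c d e <;> simp_all
lemma pv_keyfun4 : (fun n => pvKey n == 4) = (fun n => n == "Test Agent") := by
  funext n; rw [pvKey_spec]; split_ifs with a b c d e <;> simp_all
lemma pv_keyfun5 : (fun n => pvKey n == 5) = (fun n => !pvOrd.contains n) := by
  funext n; rw [pvKey_spec]; unfold pvOrd; split_ifs with a b c d e <;> simp_all

-- ===== VERDICT (by name: the statement is the Claim_ definition above) =====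
theorem ordered_required_agents_py_spec : Claim_equal_ordered_required_agents_py := by
  intro req _
  show ordered_required_agents_py req = ordered_required_agents_py_alt req
  rw [pvA_spec, pvB_spec, pv_keyfun0, pv_keyfun1, pv_keyfun2, pv_keyfun3, pv_keyfun4, pv_keyfun5,
    pv_filter_single, pv_filter_single, pv_filter_single, pv_filter_single, pv_filter_single]
  by_cases h0 : "Knowledge Agent" ∈ req <;> by_cases h1 : "Workspace Agent" ∈ req <;>
    by_cases h2 : "Execution Agent" ∈ req <;>
    by_cases h3 : "External Agent Broker" ∈ req <;>
    by_cases h4 : "Test Agent" ∈ req <;>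
    simp [pvOrd, List.filter_cons, h0, h1, h2, h3, h4]
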